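-- pv_equiv track=rewrite | github.com/gudrb4869/algorithm | 프로그래머스/level2/기능개발.py | solution
-- ===== SOURCE A (Python) =====
-- from math import ceil
--
-- def solution(progresses, speeds):
--     answer = []
--     rest = []
--     for p, s in zip(progresses, speeds):
--         rest.append(ceil((100 - p) / s))
--
--     cur = 0
--     for i in range(len(rest)):
--         if cur >= rest[i]:
--             answer[-1] += 1
--         else:
--             answer.append(1)
--             cur = rest[i]
--
--     return answer
-- ===== SOURCE B (Python) =====
-- def solution(progresses, speeds):
--     # exact integer ceiling division: ceil((100-p)/s) == -(-(100-p)//s)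
--     days = [-(-(100 - p) // s) for p, s in zip(progresses, speeds)]
--
--     # Recursive segmentation: the first element is its group's leader; scan
--     # forward to the first strictly greater day (the next leader), emit the
--     # span length, and recurse on the remainder.  No running-max sequence is
--     # ever built.
--     def groups(lst):
--         if not lst:
--             return []
--         leader, rest = lst[0], lst[1:]
--         k = 0
--         while k < len(rest) and rest[k] <= leader:
--             k += 1
--         return [k + 1] + groups(rest[k:])
--
--     return groups(days)
-- ===== Notes on version B (the rewrite author's own statement) =====
-- stated objective: alternative
-- what changed: A sweeps once maintaining a running maximum and mutating answer[-1]; B instead segments the day list recursively: each group's leader is the segment head, a forward scan finds the next strictly greater element (the next leader), the span length is emitted and the tail is recursed on - no running maximum is maintained.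
import Mathlib
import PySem

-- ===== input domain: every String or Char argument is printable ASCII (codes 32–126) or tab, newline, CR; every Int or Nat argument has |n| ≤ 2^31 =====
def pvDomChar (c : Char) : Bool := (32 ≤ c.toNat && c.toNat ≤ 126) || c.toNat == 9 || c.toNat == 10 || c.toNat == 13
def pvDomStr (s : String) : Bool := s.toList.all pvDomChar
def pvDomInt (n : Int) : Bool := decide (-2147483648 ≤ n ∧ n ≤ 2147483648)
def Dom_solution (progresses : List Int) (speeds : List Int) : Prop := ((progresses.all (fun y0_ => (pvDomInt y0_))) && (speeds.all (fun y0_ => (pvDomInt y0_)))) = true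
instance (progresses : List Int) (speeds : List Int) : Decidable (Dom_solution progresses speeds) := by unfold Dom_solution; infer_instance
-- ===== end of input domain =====

-- B replaces A's running-maximum sweep by recursive segmentation at the next strictly
-- greater day (objective: alternative algorithm, same O(n) cost). Return value only.

-- ===== PORT A =====
-- ceil((100-p)/s): Python's math.ceil of a float quotient; for |arguments| ≤ 2^31 the float
-- quotient never rounds across an integer, so it equals the exact integer ceiling -((-a) // s).
def pyCeilDiv (a : Int) (s : Int) : Int := -(PySem.Int.floordiv (-a) s)

-- answer[-1] += 1  (Python raises IndexError on []; that input is excluded by Pre_solution)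
def pyBumpLast (l : List Int) : List Int := l.dropLast ++ [l.getLast! + 1]

def solution (progresses : List Int) (speeds : List Int) : List Int :=
  let rest := (progresses.zip speeds).foldl
    (fun rest ps => rest ++ [pyCeilDiv (100 - ps.1) ps.2]) []
  let r := (PySem.List.pyRange 0 (PySem.List.len rest) 1).foldl
    (fun (st : List Int × Int) i =>
      let ri := PySem.List.pyGetD rest i 0
      if st.2 ≥ ri then (pyBumpLast st.1, st.2) else (st.1 ++ [1], ri)) ([], 0)
  r.1

-- ===== PORT B =====
-- groups(lst): leader is the head, scan the tail while ≤ leader (the while loop,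
-- ported as takeWhile and its length k), emit k+1, recurse on rest[k:].
def segGroups : List Int → List Int
  | [] => []
  | d :: ds =>
      let k := (ds.takeWhile (fun x => decide (x ≤ d))).length
      ((k : Int) + 1) :: segGroups (ds.drop k)
termination_by l => l.length
decreasing_by simp

def solution_alt (progresses : List Int) (speeds : List Int) : List Int :=
  let days := (progresses.zip speeds).map (fun ps => pyCeilDiv (100 - ps.1) ps.2)
  segGroups days

-- ===== PRECONDITION & SPEC =====
-- Pre_ admits exactly the inputs where Python A returns: every zipped speed nonzero
-- (else ZeroDivisionError) and, if there is a first pair, its day count is ≥ 1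
-- (else `answer[-1] += 1` hits the empty list and raises IndexError).
def Pre_solution (progresses : List Int) (speeds : List Int) : Prop :=
  (∀ ps ∈ progresses.zip speeds, ps.2 ≠ 0) ∧
  (∀ ps ∈ (progresses.zip speeds).head?, 1 ≤ pyCeilDiv (100 - ps.1) ps.2)
instance (progresses : List Int) (speeds : List Int) : Decidable (Pre_solution progresses speeds) := by unfold Pre_solution; infer_instance

def pvWitness_solution : List Int × List Int := ([93, 30, 55], [1, 30, 5])

def Spec_solution (progresses : List Int) (speeds : List Int) (out : List Int) : Prop := out = solution_alt progresses speeds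
instance (progresses : List Int) (speeds : List Int) (out : List Int) : Decidable (Spec_solution progresses speeds out) := by unfold Spec_solution; infer_instance

-- ===== CLAIM =====
def Claim_equal_solution : Prop := ∀ (progresses : List Int) (speeds : List Int), Dom_solution progresses speeds → Pre_solution progresses speeds → Spec_solution progresses speeds (solution progresses speeds)

-- ===== LEMMAS AND PROOFS =====

-- running maxima of ds starting from current maximum c (characterises A's loop state)
def accMax : Int → List Int → List Int
  | _, [] => []
  | c, d :: ds => max c d :: accMax (max c d) ds

-- run-length grouping of consecutive equal values, with open group (key, cnt)
def go : Int → Int → List Int → List Int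
  | _, cnt, [] => [cnt]
  | key, cnt, m :: ms => if m = key then go key (cnt + 1) ms else cnt :: go m 1 ms

theorem foldl_snoc_map (f : Int × Int → Int) (l : List (Int × Int)) (acc : List Int) :
    l.foldl (fun rest ps => rest ++ [f ps]) acc = acc ++ l.map f := by
  induction l generalizing acc with
  | nil => simp
  | cons x xs ih => simp [List.foldl_cons, ih]

theorem bump_snoc (ans : List Int) (cnt : Int) :
    pyBumpLast (ans ++ [cnt]) = ans ++ [cnt + 1] := by
  simp [pyBumpLast, List.getLast!_eq_getLast?_getD]

theorem loopA_fold (ds : List Int) (ans : List Int) (c cnt : Int) :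
    (ds.foldl
      (fun (st : List Int × Int) ri =>
        if st.2 ≥ ri then (pyBumpLast st.1, st.2) else (st.1 ++ [1], ri))
      (ans ++ [cnt], c)).1 = ans ++ go c cnt (accMax c ds) := by
  induction ds generalizing ans c cnt with
  | nil => simp [accMax, go]
  | cons d ds ih =>
    by_cases h : c ≥ d
    · have hmax : max c d = c := by omega
      have := ih ans c (cnt + 1)
      simpa [List.foldl_cons, h, bump_snoc, accMax, hmax, go] using this
    · have hmax : max c d = d := by omega
      have hne : ¬ (d = c) := by omega
      have := ih (ans ++ [cnt]) d 1
      simpa [List.foldl_cons, h, accMax, hmax, go, hne] using this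

theorem drop_takeWhile_length (p : Int → Bool) (ds : List Int) :
    ds.drop (ds.takeWhile p).length = ds.dropWhile p := by
  induction ds with
  | nil => simp
  | cons d ds ih =>
    by_cases h : p d = true
    · simp [List.takeWhile, List.dropWhile, h, ih]
    · simp [List.takeWhile, List.dropWhile, h]

theorem segGroups_nil : segGroups [] = [] := by rw [segGroups]

theorem segGroups_cons (d : Int) (ds : List Int) :
    segGroups (d :: ds)
      = (((ds.takeWhile (fun x => decide (x ≤ d))).length : Int) + 1)
        :: segGroups (ds.dropWhile (fun x => decide (x ≤ d))) := by
  rw [segGroups, drop_takeWhile_length]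

-- A's grouping of the running-max sequence is B's segmentation
theorem go_accMax (ds : List Int) (c cnt : Int) :
    go c cnt (accMax c ds)
      = (cnt + ((ds.takeWhile (fun x => decide (x ≤ c))).length : Int))
        :: segGroups (ds.dropWhile (fun x => decide (x ≤ c))) := by
  induction ds generalizing c cnt with
  | nil => simp [accMax, go, segGroups_nil]
  | cons d ds ih =>
    by_cases h : d ≤ c
    · have hmax : max c d = c := by omega
      have hp : decide (d ≤ c) = true := by simpa using h
      simp only [List.takeWhile_cons, List.dropWhile_cons, hp, if_true]
      show go c cnt (max c d :: accMax (max c d) ds) = _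
      rw [hmax]
      have hgo : go c cnt (c :: accMax c ds) = go c (cnt + 1) (accMax c ds) := by
        simp [go]
      rw [hgo, ih c (cnt + 1)]
      simp [List.cons.injEq]
      ring
    · have hmax : max c d = d := by omega
      have hne : ¬ (d = c) := by omega
      have hp : decide (d ≤ c) = false := by simpa using h
      simp only [List.takeWhile_cons, List.dropWhile_cons, hp, if_false, Bool.false_eq_true]
      show go c cnt (max c d :: accMax (max c d) ds) = _
      rw [hmax]
      have hgo : go c cnt (d :: accMax d ds) = cnt :: go d 1 (accMax d ds) := by
        simp [go, hne]
      rw [hgo, ih d 1, segGroups_cons]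
      simp [List.cons.injEq]
      ring

-- ===== VERDICT =====
theorem solution_spec : Claim_equal_solution := by
  intro progresses speeds _ hpre
  unfold Spec_solution solution solution_alt
  rcases hpre with ⟨-, hhead⟩
  rw [foldl_snoc_map (fun ps => pyCeilDiv (100 - ps.1) ps.2)]
  simp only [List.nil_append]
  rw [PySem.List.foldl_pyRange_zero_pyGetD
        ((progresses.zip speeds).map (fun ps => pyCeilDiv (100 - ps.1) ps.2)) 0
        (fun (st : List Int × Int) ri =>
          if st.2 ≥ ri then (pyBumpLast st.1, st.2) else (st.1 ++ [1], ri)) ([], 0)]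
  cases hz : (progresses.zip speeds).map (fun ps => pyCeilDiv (100 - ps.1) ps.2) with
  | nil => simp [segGroups_nil]
  | cons r rs =>
    have hr : 1 ≤ r := by
      cases hzz : progresses.zip speeds with
      | nil => simp [hzz] at hz
      | cons ps tl =>
        have := hhead ps (by simp [hzz])
        simp [hzz] at hz
        omega
    have hcond : ¬ ((0 : Int) ≥ r) := by omega
    rw [List.foldl_cons]
    have hstep : (if (0:Int) ≥ r then (pyBumpLast [], (0:Int)) else (([]:List Int) ++ [1], r)) = ([1], r) := by
      simp [hcond]
    rw [hstep]
    have hA := loopA_fold rs [] r 1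
    simp only [List.nil_append] at hA
    rw [hA, go_accMax, segGroups_cons]
    simp [List.cons.injEq]
    ring
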